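-- pv_equiv track=rewrite | github.com/enw860/leetcode | code49.py | _formatStrKey
-- ===== SOURCE A (Python) =====
-- from typing import List, Dict
--
-- def _formatStrKey(s: str) -> str:
--     s_dict: Dict = {}
--     for char in list(s):
--         if char in s_dict:
--             s_dict[char] += 1
--         else:
--             s_dict[char] = 1
--
--     s_counts: List[str] = []
--     for key, val in s_dict.items():
--         s_counts.append(f"{key}{val}")
--
--     s_counts.sort()
--     return "_".join(s_counts)
-- ===== SOURCE B (Python) =====
-- def _formatStrKey(s: str) -> str:
--     chars = sorted(s)
--     parts = []
--     i = 0
--     n = len(chars)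
--     while i < n:
--         j = i
--         while j < n and chars[j] == chars[i]:
--             j += 1
--         parts.append(f"{chars[i]}{j - i}")
--         i = j
--     return "_".join(parts)
-- ===== Notes on version B (the rewrite author's own statement) =====
-- stated objective: alternative
-- what changed: B drops A's dict counting followed by sorting the formatted strings: it sorts the characters first and emits one formatted part per consecutive run in a single scan, so no dict and no string sort is needed.
import Mathlib
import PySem

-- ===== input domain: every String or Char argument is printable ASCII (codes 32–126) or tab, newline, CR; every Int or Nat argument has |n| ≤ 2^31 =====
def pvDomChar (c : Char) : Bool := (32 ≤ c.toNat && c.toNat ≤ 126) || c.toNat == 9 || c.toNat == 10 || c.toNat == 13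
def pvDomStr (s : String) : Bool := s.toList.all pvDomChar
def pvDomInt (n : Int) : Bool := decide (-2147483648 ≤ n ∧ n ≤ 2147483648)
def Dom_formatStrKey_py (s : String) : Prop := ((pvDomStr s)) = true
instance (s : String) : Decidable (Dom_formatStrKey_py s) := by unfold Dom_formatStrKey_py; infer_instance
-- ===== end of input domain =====

set_option maxHeartbeats 1000000


-- B replaces A's dict-count-then-sort-the-formatted-strings with sort-the-chars-then-one-run-length-scan (alternative algorithm, similar cost).

def formatStrKey_py (s : String) : String :=
  let sDict : PySem.Dict Char Int :=
    s.toList.foldl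
      (fun d c => if d.contains c then d.insert c (d.getD c 0 + 1) else d.insert c 1)
      PySem.Dict.empty
  let sCounts : List String :=
    sDict.items.foldl (fun acc p => acc ++ [String.ofList (p.1 :: (PySem.Int.toStr p.2).toList)]) []
  PySem.Str.join "_" (PySem.List.sorted sCounts (fun x => x))

-- ===== PORT B =====
-- the run-length scan over the sorted characters (B's while-loop: one group per step)
def pvRuns : List Char → List String
  | [] => []
  | c :: rest =>
    String.ofList (c :: (PySem.Int.toStr (1 + ((rest.takeWhile (· == c)).length : Int))).toList)
      :: pvRuns (rest.dropWhile (· == c))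
termination_by l => l.length
decreasing_by
  have := List.length_dropWhile_le (· == c) rest
  simp; omega

def formatStrKey_py_alt (s : String) : String :=
  PySem.Str.join "_" (pvRuns (PySem.List.sorted s.toList (fun c => c)))

-- ===== PRECONDITION & SPEC =====
def Spec_formatStrKey_py (s : String) (out : String) : Prop := out = formatStrKey_py_alt s
instance (s : String) (out : String) : Decidable (Spec_formatStrKey_py s out) := by unfold Spec_formatStrKey_py; infer_instance

-- ===== CLAIM (what is proved, stated in full; the proofs are below) =====
def Claim_equal_formatStrKey_py : Prop := ∀ (s : String), Dom_formatStrKey_py s → Spec_formatStrKey_py s (formatStrKey_py s)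

-- ===== LEMMAS AND PROOFS =====

theorem pvRuns_nil : pvRuns [] = [] := by rw [pvRuns]

theorem pvRuns_cons (c : Char) (rest : List Char) :
    pvRuns (c :: rest) =
      String.ofList (c :: (PySem.Int.toStr (1 + ((rest.takeWhile (· == c)).length : Int))).toList)
        :: pvRuns (rest.dropWhile (· == c)) := by rw [pvRuns]

def pvFmt (c : Char) (n : Int) : String := String.ofList (c :: (PySem.Int.toStr n).toList)

theorem pv_fold_append_map {α β : Type} (f : α → β) (l : List α) (acc : List β) :
    l.foldl (fun a x => a ++ [f x]) acc = acc ++ l.map f := by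
  induction l generalizing acc with
  | nil => simp
  | cons x t ih => simp [List.foldl, ih]

theorem pv_dict_eq_counter (chars : List Char) :
    chars.foldl (fun d c => if d.contains c then d.insert c (d.getD c 0 + 1) else d.insert c 1)
      PySem.Dict.empty = PySem.Dict.counter chars := by
  have hstep : (fun (d : PySem.Dict Char Int) c =>
      if d.contains c then d.insert c (d.getD c 0 + 1) else d.insert c 1)
      = fun d c => d.insert c (d.getD c 0 + 1) := by
    funext d c
    by_cases h : d.contains c = true
    · simp [h]
    · have h' : d.contains c = false := by simpa using h
      have : d.getD c 0 = 0 := by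
        simp only [PySem.Dict.getD, (PySem.Dict.get?_eq_none_iff_contains d c).mpr h']
        rfl
      simp [h', this]
  rw [hstep, PySem.Dict.foldl_insert_getD_add_one_eq_counter]

theorem pv_ofList_cons_cons (c : Char) (l : List Char) :
    PySem.Set.ofList (c :: c :: l) = PySem.Set.ofList (c :: l) := by
  rw [PySem.Set.ofList_cons, PySem.Set.ofList_cons]
  simp [PySem.Set.discard, List.filter_filter]

theorem pv_ofList_dups (c : Char) (t r : List Char) (ht : ∀ x ∈ t, x = c) :
    PySem.Set.ofList (c :: (t ++ r)) = PySem.Set.ofList (c :: r) := by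
  induction t with
  | nil => rfl
  | cons x t ih =>
      have hx : x = c := ht x (by simp)
      subst hx
      rw [List.cons_append, pv_ofList_cons_cons]
      exact ih (fun y hy => ht y (by simp [hy]))

theorem pv_discard_not_mem (s : PySem.Set Char) (c : Char) (h : c ∉ s) : s.discard c = s := by
  unfold PySem.Set.discard
  apply List.filter_eq_self.mpr
  intro y hy
  simp only [Bool.not_eq_eq_eq_not, Bool.not_true, beq_eq_false_iff_ne, ne_eq]
  rintro rfl; exact h hy

theorem pv_head_dropWhile (p : Char → Bool) (l : List Char) (hd : Char) (tl : List Char)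
    (h : l.dropWhile p = hd :: tl) : p hd = false := by
  induction l with
  | nil => simp [List.dropWhile] at h
  | cons x xs ih =>
      rw [List.dropWhile_cons] at h
      by_cases hp : p x = true
      · rw [if_pos hp] at h; exact ih h
      · rw [if_neg hp] at h
        cases h
        simpa using hp

theorem pv_runs_spec (l : List Char) (h : l.Pairwise (· ≤ ·)) :
    pvRuns l = (PySem.Set.ofList l).map (fun c => pvFmt c (l.count c : Int))
    ∧ (PySem.Set.ofList l : List Char).Pairwise (· < ·) := by
  induction l using pvRuns.induct with
  | case1 => exact ⟨by rw [pvRuns_nil]; simp [PySem.Set.ofList_nil], by simp [PySem.Set.ofList_nil]⟩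
  | case2 c rest ih =>
      rw [List.pairwise_cons] at h
      obtain ⟨hcle, hrest⟩ := h
      set t := rest.takeWhile (· == c) with htdef
      set r := rest.dropWhile (· == c) with hrdef
      have ht : ∀ x ∈ t, x = c := by
        intro x hx
        have := List.mem_takeWhile_imp hx
        simpa using this
      have hrp : r.Pairwise (· ≤ ·) := hrest.sublist (List.dropWhile_sublist _)
      have hcr : ∀ x ∈ r, c < x := by
        cases hr : r with
        | nil => simp
        | cons hd tl =>
            have hr' : rest.dropWhile (· == c) = hd :: tl := by rw [← hrdef]; exact hr
            have hhd : (hd == c) = false := pv_head_dropWhile (fun x => x == c) rest hd tl hr'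
            have hne : hd ≠ c := by simpa using hhd
            have hdmem : hd ∈ rest := (List.dropWhile_sublist _).subset (by rw [hr']; simp)
            have hclt : c < hd := lt_of_le_of_ne (hcle hd hdmem) (Ne.symm hne)
            intro x hx
            rcases List.mem_cons.mp hx with rfl | hx'
            · exact hclt
            · have : hd ≤ x := by
                rw [hr] at hrp
                exact (List.pairwise_cons.mp hrp).1 x hx'
              exact lt_of_lt_of_le hclt this
      have hcnr : c ∉ r := fun hm => lt_irrefl c (hcr c hm)
      have hrt : rest = t ++ r := by rw [htdef, hrdef, List.takeWhile_append_dropWhile]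
      have hofl : PySem.Set.ofList (c :: rest) = c :: PySem.Set.ofList r := by
        rw [hrt, pv_ofList_dups c t r ht, PySem.Set.ofList_cons,
          pv_discard_not_mem _ _ (by rw [PySem.Set.mem_ofList]; exact hcnr)]
      have hcount : (c :: rest).count c = 1 + t.length := by
        rw [hrt]
        have h1 : t.count c = t.length := List.count_eq_length.mpr (fun b hb => ((ht b hb) ▸ rfl))
        have h2 : r.count c = 0 := List.count_eq_zero.mpr hcnr
        simp [h1, h2]
        omega
      have hcountr : ∀ x ∈ r, (c :: rest).count x = r.count x := by
        intro x hx
        have hxc : x ≠ c := fun he => hcnr (he ▸ hx)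
        have hxt : x ∉ t := fun hmem => hxc (ht x hmem)
        have hxc' : ¬ c = x := fun h => hxc h.symm
        rw [hrt]
        simp [hxc', List.count_eq_zero.mpr hxt]
      obtain ⟨ihe, ihp⟩ := ih hrp
      constructor
      · rw [pvRuns_cons, ← htdef, ← hrdef, hofl, List.map_cons, ihe, List.cons_eq_cons]
        refine ⟨?_, ?_⟩
        · unfold pvFmt
          rw [hcount]
          push_cast
          rfl
        · apply List.map_congr_left
          intro x hx
          have hxr : x ∈ r := (PySem.Set.mem_ofList _ _).mp hx
          rw [hcountr x hxr]
      · rw [hofl, List.pairwise_cons]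
        exact ⟨fun x hx => hcr x ((PySem.Set.mem_ofList _ _).mp hx), ihp⟩

theorem pv_fmt_lt (c d : Char) (m n : Int) (h : c < d) : pvFmt c m < pvFmt d n := by
  unfold pvFmt
  rw [String.lt_iff_toList_lt]
  simp only [String.toList_ofList]
  show List.Lex _ _ _
  exact List.Lex.rel h

theorem pv_main' (s : String) : formatStrKey_py s = formatStrKey_py_alt s := by
  simp only [formatStrKey_py, formatStrKey_py_alt]
  rw [pv_dict_eq_counter, pv_fold_append_map, PySem.Dict.items_counter, List.nil_append, List.map_map]
  set chars := s.toList with hch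
  set L := PySem.List.sorted chars (fun c => c) with hL
  have hLp : L.Perm chars := PySem.List.sorted_perm _ _ _
  have hLs : L.Pairwise (· ≤ ·) := by
    have := PySem.List.sorted_pairwise chars (fun c => c)
    simpa using this
  obtain ⟨heq, hpw⟩ := pv_runs_spec L hLs
  congr 1
  apply PySem.List.sorted_eq_of_perm_of_pairwise_lt
  · -- perm
    rw [heq]
    have hmcongr : (PySem.Set.ofList L).map (fun c => pvFmt c (L.count c : Int))
        = (PySem.Set.ofList L).map (fun c => pvFmt c (chars.count c : Int)) := by
      apply List.map_congr_left
      intro x hx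
      rw [hLp.count_eq]
    rw [hmcongr]
    have hsp : (PySem.Set.ofList L : List Char).Perm (PySem.Set.ofList chars) := by
      rw [List.perm_ext_iff_of_nodup (PySem.Set.nodup_ofList _) (PySem.Set.nodup_ofList _)]
      intro x
      rw [PySem.Set.mem_ofList, PySem.Set.mem_ofList, hLp.mem_iff]
    exact (hsp.map _)
  · -- pairwise lt
    rw [heq]
    exact List.Pairwise.map _ (fun a b hab => pv_fmt_lt a b _ _ hab) hpw

-- ===== VERDICT (by name: the statement is the Claim_ definition above) =====
theorem formatStrKey_py_spec : Claim_equal_formatStrKey_py := by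
  intro s _
  show _ = _
  exact pv_main' s
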